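-- pv_equiv track=rewrite | github.com/Thebright10/Mental_health | chatbot/views.py | mental_health_score
-- ===== SOURCE A (Python) =====
-- suicide_words = [
--     "suicide", "kill myself", "die", "end my life",
--     "no reason to live", "want to die", "self harm"
-- ]
--
-- def mental_health_score(text_emotion, face_emotion, text):
--     score = 0
--     negative      = ["sadness", "anger", "fear", "grief", "remorse", "nervousness"]
--     positive_face = ["happy", "surprised"]
--
--     if text_emotion in negative:
--         score += 3
--     if face_emotion in negative:
--         score += 3
--
--     text_lower = text.lower()
--     for word in suicide_words:
--         if word in text_lower:
--             score += 10
--             if face_emotion in positive_face: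
--                 score -= 2
--
--     return max(score, 0)
-- ===== SOURCE B (Python) =====
-- suicide_words = [
--     "suicide", "kill myself", "die", "end my life",
--     "no reason to live", "want to die", "self harm"
-- ]
--
-- def mental_health_score(text_emotion, face_emotion, text):
--     # Scan the text position by position, collecting the set of phrases that
--     # start at some position; then score arithmetically from that set's size.
--     negative = ["sadness", "anger", "fear", "grief", "remorse", "nervousness"]
--     text_lower = text.lower()
--     found = set()
--     for i in range(len(text_lower) + 1):
--         suffix = text_lower[i:]
--         for w in suicide_words:
--             if suffix.startswith(w):
--                 found.add(w)
--     per_match = 8 if face_emotion in ("happy", "surprised") else 10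
--     score = 3 * (text_emotion in negative) + 3 * (face_emotion in negative) \
--             + per_match * len(found)
--     return max(score, 0)
-- ===== Notes on version B (the rewrite author's own statement) =====
-- stated objective: alternative
-- what changed: B replaces A's per-phrase substring search with a running score by a position scan of the text: it walks every starting index once, collects the set of phrases that begin at some index, and computes the score arithmetically from that set's size and the emotion memberships.
import Mathlib
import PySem

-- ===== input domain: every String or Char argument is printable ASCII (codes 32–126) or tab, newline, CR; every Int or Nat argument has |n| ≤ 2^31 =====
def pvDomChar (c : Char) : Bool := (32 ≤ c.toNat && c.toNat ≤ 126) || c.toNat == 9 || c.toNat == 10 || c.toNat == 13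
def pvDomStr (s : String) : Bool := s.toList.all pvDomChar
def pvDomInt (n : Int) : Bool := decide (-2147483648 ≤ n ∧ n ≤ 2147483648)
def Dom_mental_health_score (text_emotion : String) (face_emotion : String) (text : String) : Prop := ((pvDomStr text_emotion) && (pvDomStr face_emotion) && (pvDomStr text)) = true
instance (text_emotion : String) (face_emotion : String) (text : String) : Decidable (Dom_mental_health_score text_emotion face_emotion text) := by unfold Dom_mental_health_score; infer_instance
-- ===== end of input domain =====

-- B scans the text position by position, collecting the SET of phrases that start somewhere,
-- then scores arithmetically from that set's size — a different traversal than A's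
-- per-phrase substring search with a running score (alternative, not claimed faster).

def suicide_words : List String :=
  ["suicide", "kill myself", "die", "end my life",
   "no reason to live", "want to die", "self harm"]

-- ===== PORT A =====
def mental_health_score (text_emotion : String) (face_emotion : String) (text : String) : Int :=
  let negative : List String := ["sadness", "anger", "fear", "grief", "remorse", "nervousness"]
  let positive_face : List String := ["happy", "surprised"]
  let score : Int := 0
  let score := if text_emotion ∈ negative then score + 3 else score
  let score := if face_emotion ∈ negative then score + 3 else score
  let text_lower := PySem.Str.lower text
  let score := suicide_words.foldl
    (fun s word =>
      if PySem.Str.isIn word text_lower then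
        let s := s + 10
        if face_emotion ∈ positive_face then s - 2 else s
      else s) score
  max score 0

-- ===== PORT B =====
def mental_health_score_alt (text_emotion : String) (face_emotion : String) (text : String) : Int :=
  let negative : List String := ["sadness", "anger", "fear", "grief", "remorse", "nervousness"]
  let text_lower := PySem.Str.lower text
  let found : PySem.Set String :=
    (PySem.List.pyRange 0 (PySem.Str.len text_lower + 1) 1).foldl
      (fun fnd i =>
        let suffix := PySem.Str.slice text_lower (some i) none
        suicide_words.foldl
          (fun f w => if PySem.Str.startswith suffix w then PySem.Set.add f w else f) fnd)
      PySem.Set.empty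
  let per_match : Int := if face_emotion ∈ (["happy", "surprised"] : List String) then 8 else 10
  let score : Int := 3 * (if text_emotion ∈ negative then 1 else 0)
      + 3 * (if face_emotion ∈ negative then 1 else 0)
      + per_match * PySem.Set.len found
  max score 0

-- ===== PRECONDITION & SPEC =====
def Spec_mental_health_score (text_emotion : String) (face_emotion : String) (text : String) (out : Int) : Prop := out = mental_health_score_alt text_emotion face_emotion text
instance (text_emotion : String) (face_emotion : String) (text : String) (out : Int) : Decidable (Spec_mental_health_score text_emotion face_emotion text out) := by unfold Spec_mental_health_score; infer_instance

-- ===== CLAIM (what is proved, stated in full; the proofs are below) =====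
def Claim_equal_mental_health_score : Prop := ∀ (text_emotion : String) (face_emotion : String) (text : String), Dom_mental_health_score text_emotion face_emotion text → Spec_mental_health_score text_emotion face_emotion text (mental_health_score text_emotion face_emotion text)

-- ===== LEMMAS AND PROOFS =====

/-- Inner fold: membership in the accumulated set. -/
lemma mem_innerFold (ws : List String) (p : String → Bool) (s : PySem.Set String) (x : String) :
    x ∈ ws.foldl (fun f w => if p w then PySem.Set.add f w else f) s
      ↔ x ∈ s ∨ (x ∈ ws ∧ p x = true) := by
  induction ws generalizing s with
  | nil => simp
  | cons w ws ih =>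
    simp only [List.foldl_cons, List.mem_cons]
    by_cases h : p w
    · rw [if_pos h, ih]
      simp only [PySem.Set.mem_add]
      constructor
      · rintro (⟨hs | he⟩ | ⟨hm, hp⟩)
        · exact Or.inl hs
        · exact Or.inr ⟨Or.inl he, he ▸ h⟩
        · exact Or.inr ⟨Or.inr hm, hp⟩
      · rintro (hs | ⟨(he | hm), hp⟩)
        · exact Or.inl (Or.inl hs)
        · exact Or.inl (Or.inr he)
        · exact Or.inr ⟨hm, hp⟩
    · rw [if_neg h, ih]
      constructor
      · rintro (hs | ⟨hm, hp⟩)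
        · exact Or.inl hs
        · exact Or.inr ⟨Or.inr hm, hp⟩
      · rintro (hs | ⟨(he | hm), hp⟩)
        · exact Or.inl hs
        · exact absurd (he ▸ hp) (by simpa using h)
        · exact Or.inr ⟨hm, hp⟩

lemma nodup_innerFold (ws : List String) (p : String → Bool) (s : PySem.Set String)
    (hs : s.Nodup) :
    (ws.foldl (fun f w => if p w then PySem.Set.add f w else f) s).Nodup := by
  induction ws generalizing s with
  | nil => exact hs
  | cons w ws ih =>
    simp only [List.foldl_cons]
    split_ifs
    · exact ih _ (PySem.Set.nodup_add _ _ hs)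
    · exact ih _ hs

/-- Outer fold: membership in the final set. -/
lemma mem_outerFold (rs : List Int) (q : Int → String → Bool) (s : PySem.Set String) (x : String) :
    x ∈ rs.foldl (fun fnd i =>
        suicide_words.foldl (fun f w => if q i w then PySem.Set.add f w else f) fnd) s
      ↔ x ∈ s ∨ (x ∈ suicide_words ∧ ∃ i ∈ rs, q i x = true) := by
  induction rs generalizing s with
  | nil => simp
  | cons r rs ih =>
    simp only [List.foldl_cons]
    rw [ih, mem_innerFold]
    constructor
    · rintro ((hs | ⟨hm, hp⟩) | ⟨hm, i, hi, hp⟩)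
      · exact Or.inl hs
      · exact Or.inr ⟨hm, r, List.mem_cons_self, hp⟩
      · exact Or.inr ⟨hm, i, List.mem_cons_of_mem _ hi, hp⟩
    · rintro (hs | ⟨hm, i, hi, hp⟩)
      · exact Or.inl (Or.inl hs)
      · rcases List.mem_cons.mp hi with rfl | hi
        · exact Or.inl (Or.inr ⟨hm, hp⟩)
        · exact Or.inr ⟨hm, i, hi, hp⟩

lemma nodup_outerFold (rs : List Int) (q : Int → String → Bool) (s : PySem.Set String)
    (hs : s.Nodup) :
    (rs.foldl (fun fnd i =>
        suicide_words.foldl (fun f w => if q i w then PySem.Set.add f w else f) fnd) s).Nodup := by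
  induction rs generalizing s with
  | nil => exact hs
  | cons r rs ih => exact ih _ (nodup_innerFold _ _ _ hs)

/-- A position where `w` starts exists iff `w` is a substring. -/
lemma exists_start_iff_isIn (tl w : String) :
    (∃ i ∈ PySem.List.pyRange 0 (PySem.Str.len tl + 1) 1,
        PySem.Str.startswith (PySem.Str.slice tl (some i) none) w = true)
      ↔ PySem.Str.isIn w tl = true := by
  rw [PySem.Str.isIn_eq, ← PySem.Chars.exists_prefix_drop_iff_isIn]
  constructor
  · rintro ⟨i, hi, hsw⟩
    rw [PySem.List.mem_pyRange_one] at hi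
    refine ⟨i.toNat, ?_⟩
    rw [PySem.Str.startswith_eq, PySem.Str.toList_slice, PySem.Chars.slice, PySem.List.slice_from _ hi.1,
        PySem.Chars.startswith_iff] at hsw
    exact hsw
  · rintro ⟨j, hj⟩
    by_cases hle : j ≤ tl.toList.length
    · refine ⟨(j : Int), ?_, ?_⟩
      · rw [PySem.List.mem_pyRange_one]
        refine ⟨Int.natCast_nonneg j, ?_⟩
        simp only [PySem.Str.len_eq]
        omega
      · rw [PySem.Str.startswith_eq, PySem.Str.toList_slice, PySem.Chars.slice,
          PySem.List.slice_from _ (Int.natCast_nonneg j), Int.toNat_natCast,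
          PySem.Chars.startswith_iff]
        exact hj
    · have hnil : tl.toList.drop j = [] := List.drop_eq_nil_of_le (by omega)
      rw [hnil] at hj
      have hw : w.toList = [] := List.prefix_nil.mp hj
      refine ⟨0, ?_, ?_⟩
      · rw [PySem.List.mem_pyRange_one]
        refine ⟨le_refl 0, ?_⟩
        simp only [PySem.Str.len_eq]; omega
      · rw [PySem.Str.startswith_eq, PySem.Str.toList_slice, PySem.Chars.slice,
          PySem.List.slice_from _ (le_refl 0), PySem.Chars.startswith_iff, hw]
        exact List.nil_prefix


/-- The final set is a permutation-length match: its size is the countP. -/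
lemma len_found_eq_countP (tl : String) :
    PySem.Set.len ((PySem.List.pyRange 0 (PySem.Str.len tl + 1) 1).foldl
      (fun fnd i =>
        suicide_words.foldl
          (fun f w => if PySem.Str.startswith (PySem.Str.slice tl (some i) none) w then PySem.Set.add f w else f) fnd)
      PySem.Set.empty)
      = ((suicide_words.countP (fun w => PySem.Str.isIn w tl) : Nat) : Int) := by
  have hnd := nodup_outerFold (PySem.List.pyRange 0 (PySem.Str.len tl + 1) 1)
    (fun i w => PySem.Str.startswith (PySem.Str.slice tl (some i) none) w)
    PySem.Set.empty (by simp [PySem.Set.empty])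
  have hperm : ((PySem.List.pyRange 0 (PySem.Str.len tl + 1) 1).foldl
      (fun fnd i =>
        suicide_words.foldl
          (fun f w => if PySem.Str.startswith (PySem.Str.slice tl (some i) none) w then PySem.Set.add f w else f) fnd)
      PySem.Set.empty).Perm (suicide_words.filter (fun w => PySem.Str.isIn w tl)) := by
    rw [List.perm_ext_iff_of_nodup hnd (List.Nodup.filter _ (by decide))]
    intro x
    rw [mem_outerFold, List.mem_filter, exists_start_iff_isIn]
    simp [PySem.Set.empty]
  rw [PySem.Set.len, hperm.length_eq, ← List.countP_eq_length_filter]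

/-- A's loop, as a closed form: `init + (8 or 10) * countP`. -/
lemma loopA_eq_countP (ws : List String) (p : String → Bool) (q : Prop) [Decidable q] (init : Int) :
    ws.foldl (fun s w => if p w then (let s := s + 10; if q then s - 2 else s) else s) init
      = init + (if q then 8 else 10) * ((ws.countP p : Nat) : Int) := by
  induction ws generalizing init with
  | nil => simp
  | cons w ws ih =>
    rw [List.foldl_cons, List.countP_cons, ih]
    by_cases h : p w <;> by_cases hq : q <;>
      simp only [h, hq, if_pos, if_neg, not_false_iff] <;>
      push_cast <;> ring

theorem mental_health_score_eq (text_emotion face_emotion text : String) :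
    mental_health_score text_emotion face_emotion text
      = mental_health_score_alt text_emotion face_emotion text := by
  unfold mental_health_score mental_health_score_alt
  simp only [loopA_eq_countP, len_found_eq_countP]
  split_ifs <;> push_cast <;> omega

-- ===== VERDICT (by name: the statement is the Claim_ definition above) =====
theorem mental_health_score_spec : Claim_equal_mental_health_score := by
  intro te fe t _
  exact mental_health_score_eq te fe t
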